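-- pv_equiv track=rewrite | github.com/omar-elsagheer/The-Meme-Search-Engine | relevance_feedback/rochio.py | creat_vectors
-- ===== SOURCE A (Python) =====
-- def creat_vectors(terms, vectors):
--     vec = []
--     n = len(terms)
--     for vector in vectors:
--         d = [0] * n
--         for term in vector:
--             count = 0
--             for word in terms:
--                 if word == term:
--                     d[count] = 1
--                 count = count + 1
--         vec.append(d)
--     return vec
-- ===== SOURCE B (Python) =====
-- def creat_vectors(terms, vectors):
--     return [[1 if word in vector else 0 for word in terms] for vector in vectors]
-- ===== Notes on version B (the rewrite author's own statement) =====
-- stated objective: simpler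
-- what changed: Inverts the loop nesting: instead of preallocating a zero array and, for each term of the vector, scanning the whole vocabulary with a manual index counter to flag matches, B directly maps each vocabulary word to 1/0 by a membership test in the vector.
import Mathlib
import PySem

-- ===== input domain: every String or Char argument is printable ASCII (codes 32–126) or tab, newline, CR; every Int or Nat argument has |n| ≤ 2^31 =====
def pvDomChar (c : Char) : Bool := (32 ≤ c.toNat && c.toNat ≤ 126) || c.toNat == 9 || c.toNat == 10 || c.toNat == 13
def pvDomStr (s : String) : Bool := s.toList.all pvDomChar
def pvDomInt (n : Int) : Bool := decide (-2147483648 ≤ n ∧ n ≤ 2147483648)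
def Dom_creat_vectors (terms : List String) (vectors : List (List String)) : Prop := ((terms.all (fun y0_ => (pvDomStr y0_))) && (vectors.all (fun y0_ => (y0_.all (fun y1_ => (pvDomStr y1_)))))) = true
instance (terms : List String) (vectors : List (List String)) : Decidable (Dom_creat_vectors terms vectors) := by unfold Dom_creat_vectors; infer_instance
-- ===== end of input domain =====

-- B inverts the loop nesting (map over the vocabulary with a membership test per vector) for a simpler implementation; same return value.
-- ===== PORT A =====
def creat_vectors (terms : List String) (vectors : List (List String)) : List (List Int) :=
  vectors.foldl (fun vec vector =>
    let n := terms.length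
    let d := List.replicate n (0 : Int)
    let d := vector.foldl (fun d term =>
      (terms.foldl (fun (st : List Int × Nat) word =>
        (if word == term then st.1.set st.2 1 else st.1, st.2 + 1)) (d, 0)).1) d
    vec ++ [d]) []

-- ===== PORT B =====
-- B: invert the loop nesting — map each vocabulary word to 1/0 by membership in the vector
def creat_vectors_alt (terms : List String) (vectors : List (List String)) : List (List Int) :=
  vectors.map (fun vector => terms.map (fun word => if vector.contains word then 1 else 0))

-- ===== PRECONDITION & SPEC =====
def Spec_creat_vectors (terms : List String) (vectors : List (List String)) (out : List (List Int)) : Prop := out = creat_vectors_alt terms vectors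
instance (terms : List String) (vectors : List (List String)) (out : List (List Int)) : Decidable (Spec_creat_vectors terms vectors out) := by unfold Spec_creat_vectors; infer_instance

-- ===== CLAIM (what is proved, stated in full; the proofs are below) =====
def Claim_equal_creat_vectors : Prop := ∀ (terms : List String) (vectors : List (List String)), Dom_creat_vectors terms vectors → Spec_creat_vectors terms vectors (creat_vectors terms vectors)

-- ===== LEMMAS AND PROOFS =====

-- ===== VERDICT (by name: the statement is the Claim_ definition above) =====
-- setting the element right after a prefix
lemma set_at_len (pre : List Int) (x v : Int) (rest : List Int) :
    (pre ++ x :: rest).set pre.length v = pre ++ v :: rest := by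
  induction pre with
  | nil => simp
  | cons a as ih => simp [ih]

-- inner scan over the vocabulary with a counter: sets position i to 1 exactly where terms[i] == t
lemma inner_loop (t : String) : ∀ (terms : List String) (pre : List Int) (f : String → Int),
    (terms.foldl (fun (st : List Int × Nat) word =>
        (if word == t then st.1.set st.2 1 else st.1, st.2 + 1)) (pre ++ terms.map f, pre.length)).1
    = pre ++ terms.map (fun w => if w == t then 1 else f w) := by
  intro terms
  induction terms with
  | nil => simp
  | cons w ws ih =>
    intro pre f
    by_cases hw : w = t
    · simp only [List.foldl_cons, List.map_cons, hw, beq_self_eq_true, if_true]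
      rw [set_at_len]
      have h1 : pre ++ (1 : Int) :: ws.map f = (pre ++ [(1 : Int)]) ++ ws.map f := by
        simp
      have h2 : pre.length + 1 = (pre ++ [(1 : Int)]).length := by simp
      rw [h1, h2, ih (pre ++ [(1 : Int)]) f]
      simp
    · have hb : (w == t) = false := by simp [hw]
      simp only [List.foldl_cons, List.map_cons, hb, Bool.false_eq_true, if_false]
      have h1 : pre ++ f w :: ws.map f = (pre ++ [f w]) ++ ws.map f := by simp
      have h2 : pre.length + 1 = (pre ++ [f w]).length := by simp
      rw [h1, h2, ih (pre ++ [f w]) f]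
      simp

-- the middle loop over the vector accumulates membership
lemma middle_loop (terms : List String) : ∀ (vector : List String) (f : String → Int),
    vector.foldl (fun d term =>
      (terms.foldl (fun (st : List Int × Nat) word =>
        (if word == term then st.1.set st.2 1 else st.1, st.2 + 1)) (d, 0)).1)
      (terms.map f)
    = terms.map (fun w => if vector.contains w then 1 else f w) := by
  intro vector
  induction vector with
  | nil => simp
  | cons t ts ih =>
    intro f
    have h1 := inner_loop t terms [] f
    simp only [List.nil_append, List.length_nil] at h1
    simp only [List.foldl_cons, h1, ih]
    apply List.map_congr_left
    intro w _
    by_cases hm : w ∈ ts <;> by_cases hw : w = t <;> simp [hm, hw]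

theorem creat_vectors_spec : Claim_equal_creat_vectors := by
  intro terms vectors hdom
  clear hdom
  unfold Spec_creat_vectors creat_vectors creat_vectors_alt
  have key : ∀ (acc : List (List Int)),
      vectors.foldl (fun vec vector =>
        let n := terms.length
        let d := List.replicate n (0 : Int)
        let d := vector.foldl (fun d term =>
          (terms.foldl (fun (st : List Int × Nat) word =>
            (if word == term then st.1.set st.2 1 else st.1, st.2 + 1)) (d, 0)).1) d
        vec ++ [d]) acc
      = acc ++ vectors.map (fun vector =>
          terms.map (fun word => if vector.contains word then 1 else 0)) := by
    induction vectors with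
    | nil => simp
    | cons v vs ih =>
      intro acc
      have hrep : List.replicate terms.length (0 : Int) = terms.map (fun _ => 0) := by
        simp [List.map_const']
      simp only [List.foldl_cons, List.map_cons]
      rw [ih]
      simp only [hrep, middle_loop]
      simp [List.append_assoc]
  simpa using key []
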